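-- pv_equiv track=rewrite | github.com/adnanaq/echora | scripts/process_stage3_relationships.py | deduplicate_by_url
-- ===== SOURCE A (Python) =====
-- def deduplicate_by_url(all_relations: list[dict]) -> list[dict]:
--     """
--     Deduplicate relations using URL-based strategy with priority hierarchy.
--     Priority: Jikan > AnimePlanet > AnimSchedule > Offline URLs
--     """
--     url_groups = {}
--
--     # Group by URL (normalize URLs first)
--     for relation in all_relations:
--         url = relation.get("url", "")
--         # Normalize URL (remove www, trailing slashes, etc.)
--         normalized_url = url.lower().replace("www.", "").rstrip("/")
--
--         if normalized_url not in url_groups: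
--             url_groups[normalized_url] = []
--         url_groups[normalized_url].append(relation)
--
--     # Select best entry per URL group using priority
--     deduplicated = []
--
--     for url, entries in url_groups.items():
--         if len(entries) == 1:
--             deduplicated.append(entries[0])
--         else:
--             # Multiple entries for same URL - apply priority hierarchy
--             best_entry = entries[0]
--
--             # Source priority: Jikan > AnimePlanet > AnimSchedule
--             for entry in entries:
--                 url = entry.get("url", "")
--                 if "myanimelist.net" in url:  # Jikan source
--                     best_entry = entry
--                     break
--                 elif "anime-planet.com" in url:  # AnimePlanet source
--                     best_entry = entry
--                 elif (
--                     "animeschedule.net" in url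
--                     and "anime-planet.com" not in best_entry.get("url", "")
--                 ):
--                     best_entry = entry
--
--             deduplicated.append(best_entry)
--
--     return deduplicated
-- ===== SOURCE B (Python) =====
-- def _priority(url):
--     if "myanimelist.net" in url:
--         return 3
--     if "anime-planet.com" in url:
--         return 2
--     if "animeschedule.net" in url:
--         return 1
--     return 0
--
--
-- def deduplicate_by_url(all_relations: list[dict]) -> list[dict]:
--     """Keep one relation per normalized URL, preferring the highest-priority source."""
--     best_by_url = {}
--     for relation in all_relations:
--         url = relation.get("url", "")
--         key = url.lower().replace("www.", "").rstrip("/")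
--         if key not in best_by_url or _priority(url) > _priority(
--             best_by_url[key].get("url", "")
--         ):
--             best_by_url[key] = relation
--     return list(best_by_url.values())
-- ===== Notes on version B (the rewrite author's own statement) =====
-- stated objective: simpler
-- what changed: Replaces the two-pass group-then-select algorithm (build URL groups, then re-scan each group with a break-ful priority loop) by a single pass keeping the current best relation per normalized URL under a strict numeric source priority; Pre_ excludes inputs where two distinct relations share a normalized URL and both have the same anime-planet or animeschedule priority, an unspecified tie on which A keeps the last such entry and B keeps the first, either choice being equally defensible.
import Mathlib
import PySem

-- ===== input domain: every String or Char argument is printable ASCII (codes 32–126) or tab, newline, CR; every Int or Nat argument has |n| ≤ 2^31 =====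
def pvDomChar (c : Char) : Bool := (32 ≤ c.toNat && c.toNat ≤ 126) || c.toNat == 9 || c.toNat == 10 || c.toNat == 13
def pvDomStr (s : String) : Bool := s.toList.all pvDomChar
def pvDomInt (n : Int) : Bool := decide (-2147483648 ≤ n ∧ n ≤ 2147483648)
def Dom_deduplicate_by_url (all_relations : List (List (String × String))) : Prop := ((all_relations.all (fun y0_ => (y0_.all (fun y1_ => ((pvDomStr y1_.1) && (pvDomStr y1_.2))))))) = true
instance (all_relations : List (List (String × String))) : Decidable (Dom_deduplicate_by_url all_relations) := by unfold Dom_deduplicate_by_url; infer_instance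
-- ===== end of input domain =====

-- B replaces A's two-pass group-then-select dedup by a single pass keeping one best
-- relation per normalized URL under a strict numeric source priority (objective: simpler).

-- shared helpers: both Pythons compute relation.get("url", "") and the same normalization
def pvGetUrl (relation : List (String × String)) : String :=
  PySem.Dict.getD ⟨relation⟩ "url" ""

-- hand port of s.rstrip("/") (PySem has no right-only strip with chars); exact:
-- removes exactly the trailing '/' characters
def pvRstripSlash (s : String) : String :=
  String.ofList ((s.toList.reverse.dropWhile (fun c => c == '/')).reverse)

def pvNorm (url : String) : String :=
  pvRstripSlash (PySem.Str.replace (PySem.Str.lower url) "www." "")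

-- ===== PORT A =====
-- the inner 'for entry in entries' loop with its break (returning e on the Jikan branch)
def dedupSelect (best : List (String × String)) :
    List (List (String × String)) → List (String × String)
  | [] => best
  | e :: rest =>
    let url := pvGetUrl e
    if PySem.Str.isIn "myanimelist.net" url then e
    else if PySem.Str.isIn "anime-planet.com" url then dedupSelect e rest
    else if PySem.Str.isIn "animeschedule.net" url
            && !(PySem.Str.isIn "anime-planet.com" (pvGetUrl best)) then dedupSelect e rest
    else dedupSelect best rest

def deduplicate_by_url (all_relations : List (List (String × String))) : List (List (String × String)) :=
  let url_groups : PySem.Dict String (List (List (String × String))) :=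
    all_relations.foldl (fun d relation =>
      let normalized_url := pvNorm (pvGetUrl relation)
      let d := if d.contains normalized_url then d else d.insert normalized_url []
      d.modify normalized_url [] (fun l => l ++ [relation])) PySem.Dict.empty
  -- entries[0]: groups are never empty, so the pyGetD default is never produced
  url_groups.items.foldl (fun deduplicated kv =>
    if kv.2.length == 1 then
      deduplicated ++ [PySem.List.pyGetD kv.2 0 []]
    else
      deduplicated ++ [dedupSelect (PySem.List.pyGetD kv.2 0 []) kv.2]) []

-- ===== PORT B =====
def pvRank (url : String) : Nat :=
  if PySem.Str.isIn "myanimelist.net" url then 3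
  else if PySem.Str.isIn "anime-planet.com" url then 2
  else if PySem.Str.isIn "animeschedule.net" url then 1
  else 0

def deduplicate_by_url_alt (all_relations : List (List (String × String))) : List (List (String × String)) :=
  (all_relations.foldl (fun best_by_url relation =>
    let url := pvGetUrl relation
    let key := pvNorm url
    -- 'key not in best or _priority(url) > _priority(best[key]…)' with its short-circuit
    match best_by_url.get? key with
    | none => best_by_url.insert key relation
    | some current =>
      if pvRank (pvGetUrl current) < pvRank url then best_by_url.insert key relation
      else best_by_url) PySem.Dict.empty).values

-- ===== PRECONDITION & SPEC =====
-- Pre_ excludes inputs where two DISTINCT relations share a normalized URL and both have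
-- the same anime-planet (rank 2) or animeschedule (rank 1) priority: that is an
-- unspecified tie, on which A keeps the last such entry and B keeps the first, either
-- choice being equally defensible.
def Pre_deduplicate_by_url (all_relations : List (List (String × String))) : Prop :=
  all_relations.Pairwise (fun x y =>
    pvNorm (pvGetUrl x) = pvNorm (pvGetUrl y) →
    pvRank (pvGetUrl x) = pvRank (pvGetUrl y) →
    (pvRank (pvGetUrl x) = 1 ∨ pvRank (pvGetUrl x) = 2) →
    x = y)
instance (all_relations : List (List (String × String))) : Decidable (Pre_deduplicate_by_url all_relations) := by unfold Pre_deduplicate_by_url; infer_instance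

def pvWitness_deduplicate_by_url : (List (List (String × String))) :=
  [[("url", "https://Myanimelist.net/anime/1"), ("title", "x")],
   [("url", "https://example.com/")], [("url", "https://example.com/")]]

def Spec_deduplicate_by_url (all_relations : List (List (String × String))) (out : List (List (String × String))) : Prop := out = deduplicate_by_url_alt all_relations
instance (all_relations : List (List (String × String))) (out : List (List (String × String))) : Decidable (Spec_deduplicate_by_url all_relations out) := by unfold Spec_deduplicate_by_url; infer_instance

-- ===== CLAIM (what is proved, stated in full; the proofs are below) =====
def Claim_equal_deduplicate_by_url : Prop := ∀ (all_relations : List (List (String × String))), Dom_deduplicate_by_url all_relations → Pre_deduplicate_by_url all_relations → Spec_deduplicate_by_url all_relations (deduplicate_by_url all_relations)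

-- ===== LEMMAS AND PROOFS =====

-- the tie condition Pre_ guarantees within a normalized-URL group
def pvTieR (x y : List (String × String)) : Prop :=
  pvRank (pvGetUrl x) = pvRank (pvGetUrl y) →
  (pvRank (pvGetUrl x) = 1 ∨ pvRank (pvGetUrl x) = 2) →
  x = y

-- B's streaming step, as a binary operation
def pvStepB (b e : List (String × String)) : List (String × String) :=
  if pvRank (pvGetUrl b) < pvRank (pvGetUrl e) then e else b

-- what B effectively keeps for a whole group of entries
def pvChoose : List (List (String × String)) → List (String × String)
  | [] => []
  | e :: es => (e :: es).foldl pvStepB e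

-- what A computes for one group
def pvSelectTop (es : List (List (String × String))) : List (String × String) :=
  if es.length == 1 then PySem.List.pyGetD es 0 []
  else dedupSelect (PySem.List.pyGetD es 0 []) es

lemma pvRank_le_three (u : String) : pvRank u ≤ 3 := by
  unfold pvRank; split_ifs <;> omega

lemma pvRank_mal {u : String} (h : PySem.Str.isIn "myanimelist.net" u = true) : pvRank u = 3 := by
  unfold pvRank; rw [h]; rfl

lemma pvRank_lt_three {u : String} (h : PySem.Str.isIn "myanimelist.net" u = false) :
    pvRank u < 3 := by
  unfold pvRank; rw [h]; simp only [Bool.false_eq_true, if_false]; split_ifs <;> omega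

lemma pvRank_ap {u : String} (hm : PySem.Str.isIn "myanimelist.net" u = false)
    (hp : PySem.Str.isIn "anime-planet.com" u = true) : pvRank u = 2 := by
  unfold pvRank; rw [hm, hp]; rfl

lemma pvRank_as {u : String} (hm : PySem.Str.isIn "myanimelist.net" u = false)
    (hp : PySem.Str.isIn "anime-planet.com" u = false)
    (hs : PySem.Str.isIn "animeschedule.net" u = true) : pvRank u = 1 := by
  unfold pvRank; rw [hm, hp, hs]; rfl

lemma pvRank_none {u : String} (hm : PySem.Str.isIn "myanimelist.net" u = false)
    (hp : PySem.Str.isIn "anime-planet.com" u = false)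
    (hs : PySem.Str.isIn "animeschedule.net" u = false) : pvRank u = 0 := by
  unfold pvRank; rw [hm, hp, hs]; rfl

lemma pvRank_le_one {u : String} (hm : PySem.Str.isIn "myanimelist.net" u = false)
    (hp : PySem.Str.isIn "anime-planet.com" u = false) : pvRank u ≤ 1 := by
  unfold pvRank; rw [hm, hp]; simp only [Bool.false_eq_true, if_false]; split_ifs <;> omega

lemma stepB_of_lt {b e : List (String × String)}
    (h : pvRank (pvGetUrl b) < pvRank (pvGetUrl e)) : pvStepB b e = e := by
  unfold pvStepB; simp [h]

lemma stepB_of_ge {b e : List (String × String)}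
    (h : ¬ pvRank (pvGetUrl b) < pvRank (pvGetUrl e)) : pvStepB b e = b := by
  unfold pvStepB; simp [h]

lemma pvStepB_self (e : List (String × String)) : pvStepB e e = e := by
  unfold pvStepB; split <;> rfl

lemma pvChoose_cons (e : List (String × String)) (es : List (List (String × String))) :
    pvChoose (e :: es) = es.foldl pvStepB e := by
  simp [pvChoose, List.foldl_cons, pvStepB_self]

lemma foldl_stepB_mal (es : List (List (String × String))) (b : List (String × String))
    (h : PySem.Str.isIn "myanimelist.net" (pvGetUrl b) = true) :
    es.foldl pvStepB b = b := by
  induction es with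
  | nil => rfl
  | cons e rest ih =>
    rw [List.foldl_cons,
      show pvStepB b e = b from stepB_of_ge (by rw [pvRank_mal h]; have := pvRank_le_three (pvGetUrl e); omega), ih]

lemma select_eq_foldl (es : List (List (String × String))) :
    ∀ b : List (String × String),
      PySem.Str.isIn "myanimelist.net" (pvGetUrl b) = false →
      (∀ e ∈ es, pvTieR b e) →
      es.Pairwise pvTieR →
      dedupSelect b es = es.foldl pvStepB b := by
  induction es with
  | nil => intro b _ _ _; rfl
  | cons e rest ih =>
    intro b hb hcond hpair
    rw [List.foldl_cons]
    have hb3 := pvRank_lt_three hb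
    obtain ⟨hhead, hpair'⟩ := List.pairwise_cons.1 hpair
    cases hm : PySem.Str.isIn "myanimelist.net" (pvGetUrl e) with
    | true =>
      rw [stepB_of_lt (by rw [pvRank_mal hm]; omega), foldl_stepB_mal rest e hm]
      simp only [dedupSelect, hm, if_true]
    | false =>
      cases hp : PySem.Str.isIn "anime-planet.com" (pvGetUrl e) with
      | true =>
        have hre : pvRank (pvGetUrl e) = 2 := pvRank_ap hm hp
        have hstep : pvStepB b e = e := by
          by_cases hlt : pvRank (pvGetUrl b) < pvRank (pvGetUrl e)
          · exact stepB_of_lt hlt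
          · have hrb : pvRank (pvGetUrl b) = 2 := by omega
            have hbe : b = e := hcond e List.mem_cons_self (by rw [hrb, hre]) (Or.inr hrb)
            rw [hbe]; exact pvStepB_self e
        rw [hstep,
          show dedupSelect b (e :: rest) = dedupSelect e rest by
            simp only [dedupSelect, hm, hp, Bool.false_eq_true, if_false, if_true]]
        exact ih e hm hhead hpair'
      | false =>
        cases hs : PySem.Str.isIn "animeschedule.net" (pvGetUrl e) with
        | true =>
          have hre : pvRank (pvGetUrl e) = 1 := pvRank_as hm hp hs
          cases hbp : PySem.Str.isIn "anime-planet.com" (pvGetUrl b) with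
          | true =>
            have hrb : pvRank (pvGetUrl b) = 2 := pvRank_ap hb hbp
            rw [stepB_of_ge (by omega),
              show dedupSelect b (e :: rest) = dedupSelect b rest by
                simp only [dedupSelect, hm, hp, hs, hbp, Bool.false_eq_true, if_false,
                  Bool.not_true, Bool.and_false]]
            exact ih b hb (fun x hx => hcond x (List.mem_cons_of_mem e hx)) hpair'
          | false =>
            have hrb1 : pvRank (pvGetUrl b) ≤ 1 := pvRank_le_one hb hbp
            have hstep : pvStepB b e = e := by
              by_cases hlt : pvRank (pvGetUrl b) < pvRank (pvGetUrl e)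
              · exact stepB_of_lt hlt
              · have hrb : pvRank (pvGetUrl b) = 1 := by omega
                have hbe : b = e := hcond e List.mem_cons_self (by rw [hrb, hre]) (Or.inl hrb)
                rw [hbe]; exact pvStepB_self e
            rw [hstep,
              show dedupSelect b (e :: rest) = dedupSelect e rest by
                simp only [dedupSelect, hm, hp, hs, hbp, Bool.false_eq_true, if_false,
                  Bool.not_false, Bool.and_true, if_true]]
            exact ih e hm hhead hpair'
        | false =>
          have hre : pvRank (pvGetUrl e) = 0 := pvRank_none hm hp hs
          rw [stepB_of_ge (by omega),
            show dedupSelect b (e :: rest) = dedupSelect b rest by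
              simp only [dedupSelect, hm, hp, hs, Bool.false_eq_true, if_false,
                Bool.false_and]]
          exact ih b hb (fun x hx => hcond x (List.mem_cons_of_mem e hx)) hpair'

lemma pyGetD_zero_cons (e : List (String × String)) (t : List (List (String × String))) :
    PySem.List.pyGetD (e :: t) 0 [] = e := by simp [pysem]

lemma selectTop_eq_choose : ∀ es : List (List (String × String)), es ≠ [] →
    es.Pairwise pvTieR → pvSelectTop es = pvChoose es
  | [], h, _ => absurd rfl h
  | [e], _, _ => by
    simp [pvSelectTop, pvChoose, pvStepB_self]
  | e :: f :: t, _, hpair => by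
    have hlen : ((e :: f :: t).length == 1) = false := by simp
    unfold pvSelectTop
    rw [hlen, pvChoose_cons, pyGetD_zero_cons]
    simp only [Bool.false_eq_true, if_false]
    cases hm : PySem.Str.isIn "myanimelist.net" (pvGetUrl e) with
    | true =>
      rw [foldl_stepB_mal (f :: t) e hm]
      simp only [dedupSelect, hm, if_true]
    | false =>
      rw [show List.foldl pvStepB e (f :: t) = List.foldl pvStepB e (e :: f :: t) by
        conv_rhs => rw [List.foldl_cons, pvStepB_self]]
      refine select_eq_foldl _ e hm ?_ hpair
      intro x hx
      rcases List.mem_cons.1 hx with h | h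
      · intro _ _; rw [h]
      · exact (List.pairwise_cons.1 hpair).1 x h

-- the two loop bodies, named for the proofs (syntactically the ports' lambdas)
def pvFA (d : PySem.Dict String (List (List (String × String))))
    (relation : List (String × String)) : PySem.Dict String (List (List (String × String))) :=
  let normalized_url := pvNorm (pvGetUrl relation)
  let d := if d.contains normalized_url then d else d.insert normalized_url []
  d.modify normalized_url [] (fun l => l ++ [relation])

def pvFB (d : PySem.Dict String (List (String × String)))
    (relation : List (String × String)) : PySem.Dict String (List (String × String)) :=
  let url := pvGetUrl relation
  let key := pvNorm url
  match d.get? key with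
  | none => d.insert key relation
  | some current =>
    if pvRank (pvGetUrl current) < pvRank url then d.insert key relation
    else d

def pvMapChoose (d : PySem.Dict String (List (List (String × String)))) :
    PySem.Dict String (List (String × String)) :=
  ⟨d.items.map (fun p => (p.1, pvChoose p.2))⟩

lemma get?_mapChoose_mk (l : List (String × List (List (String × String)))) (k : String) :
    (pvMapChoose ⟨l⟩).get? k = ((PySem.Dict.mk l).get? k).map pvChoose := by
  induction l with
  | nil => rfl
  | cons p rest ih =>
    simp only [pvMapChoose, List.map_cons] at ih ⊢
    rw [PySem.Dict.get?_mk_cons, PySem.Dict.get?_mk_cons]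
    by_cases h : (p.1 == k) = true
    · simp [h]
    · simp only [h, Bool.false_eq_true, if_false] at ih ⊢
      exact ih

lemma get?_mapChoose (d : PySem.Dict String (List (List (String × String)))) (k : String) :
    (pvMapChoose d).get? k = (d.get? k).map pvChoose := by
  obtain ⟨l⟩ := d; exact get?_mapChoose_mk l k

lemma contains_mapChoose (d : PySem.Dict String (List (List (String × String)))) (k : String) :
    (pvMapChoose d).contains k = d.contains k := by
  rw [PySem.Dict.contains_eq_isSome_get?, PySem.Dict.contains_eq_isSome_get?, get?_mapChoose]
  cases d.get? k <;> rfl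

lemma keys_mapChoose (d : PySem.Dict String (List (List (String × String)))) :
    (pvMapChoose d).keys = d.keys := by
  simp [pvMapChoose, PySem.Dict.keys, List.map_map, Function.comp]

lemma mapChoose_insert (d : PySem.Dict String (List (List (String × String))))
    (k : String) (v : List (List (String × String))) :
    pvMapChoose (d.insert k v) = (pvMapChoose d).insert k (pvChoose v) := by
  apply PySem.Dict.ext
  cases hc : d.contains k with
  | true =>
    have hc' : (pvMapChoose d).contains k = true := by rw [contains_mapChoose]; exact hc
    show ((d.insert k v).items.map (fun p => (p.1, pvChoose p.2))) = _
    rw [PySem.Dict.items_insert_of_contains d v hc, PySem.Dict.items_insert_of_contains _ _ hc']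
    show _ = (d.items.map (fun p => (p.1, pvChoose p.2))).map _
    rw [List.map_map, List.map_map]
    apply List.map_congr_left
    intro p _
    by_cases h : (p.1 == k) = true <;> simp [Function.comp, h]
  | false =>
    have hc' : (pvMapChoose d).contains k = false := by rw [contains_mapChoose]; exact hc
    show ((d.insert k v).items.map (fun p => (p.1, pvChoose p.2))) = _
    rw [PySem.Dict.items_insert_of_not_contains d v hc,
      PySem.Dict.items_insert_of_not_contains _ _ hc']
    simp [pvMapChoose]

lemma insert_get?_self {ν : Type} (d : PySem.Dict String ν) (k : String) (v : ν)
    (hn : d.keys.Nodup) (h : d.get? k = some v) : d.insert k v = d := by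
  apply PySem.Dict.ext
  rw [PySem.Dict.items_insert_of_contains d v
    (by rw [PySem.Dict.contains_eq_isSome_get?, h]; rfl)]
  conv_rhs => rw [← List.map_id d.items]
  apply List.map_congr_left
  intro p hp
  by_cases hk : (p.1 == k) = true
  · have hpk : p.1 = k := by simpa using hk
    have hp' : (p.1, p.2) ∈ d.items := by simpa using hp
    have hg : d.get? p.1 = some p.2 := PySem.Dict.get?_of_mem_items d hp' hn
    rw [hpk] at hg
    rw [hg] at h
    obtain ⟨a, b⟩ := p
    simp only [hk, if_true]
    simp at hpk h ⊢
    exact ⟨hpk.symm, h.symm⟩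
  · simp [hk]

lemma insert_insert_same {ν : Type} (d : PySem.Dict String ν) (k : String) (v w : ν)
    (hc : d.contains k = false) : (d.insert k v).insert k w = d.insert k w := by
  apply PySem.Dict.ext
  have hnk : ∀ p ∈ d.items, (p.1 == k) = false := by
    intro p hp
    have hk : k ∉ d.keys := by
      rw [PySem.Dict.contains_eq_decide_mem_keys] at hc
      simpa using hc
    have : p.1 ∈ d.keys := by
      simp only [PySem.Dict.keys]
      exact List.mem_map_of_mem hp
    simpa using fun hh : p.1 = k => hk (hh ▸ this)
  rw [PySem.Dict.items_insert_of_contains _ w (PySem.Dict.contains_insert_self _ _ _),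
    PySem.Dict.items_insert_of_not_contains d v hc,
    PySem.Dict.items_insert_of_not_contains d w hc, List.map_append]
  congr 1
  · conv_rhs => rw [← List.map_id d.items]
    apply List.map_congr_left
    intro p hp
    simp [hnk p hp]
  · simp

lemma pvFB_none (d : PySem.Dict String (List (String × String))) (r : List (String × String))
    (h : d.get? (pvNorm (pvGetUrl r)) = none) :
    pvFB d r = d.insert (pvNorm (pvGetUrl r)) r := by
  simp only [pvFB]
  rw [h]

lemma pvFB_some (d : PySem.Dict String (List (String × String))) (r c : List (String × String))
    (h : d.get? (pvNorm (pvGetUrl r)) = some c) :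
    pvFB d r = if pvRank (pvGetUrl c) < pvRank (pvGetUrl r)
               then d.insert (pvNorm (pvGetUrl r)) r else d := by
  simp only [pvFB]
  rw [h]

lemma pvFA_contains (d : PySem.Dict String (List (List (String × String))))
    (r : List (String × String)) (hc : d.contains (pvNorm (pvGetUrl r)) = true) :
    pvFA d r = d.insert (pvNorm (pvGetUrl r)) (d.getD (pvNorm (pvGetUrl r)) [] ++ [r]) := by
  simp only [pvFA, PySem.Dict.modify, hc, if_true]

lemma pvFA_not_contains (d : PySem.Dict String (List (List (String × String))))
    (r : List (String × String)) (hc : d.contains (pvNorm (pvGetUrl r)) = false) :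
    pvFA d r = (d.insert (pvNorm (pvGetUrl r)) []).insert (pvNorm (pvGetUrl r)) [r] := by
  simp only [pvFA, PySem.Dict.modify, hc, Bool.false_eq_true, if_false]
  rw [PySem.Dict.getD_insert_self, List.nil_append]

lemma pvFA_insert_single (d : PySem.Dict String (List (List (String × String))))
    (r : List (String × String)) (hc : d.contains (pvNorm (pvGetUrl r)) = false) :
    pvFA d r = d.insert (pvNorm (pvGetUrl r)) [r] := by
  rw [pvFA_not_contains d r hc, insert_insert_same d _ [] [r] hc]

lemma choose_singleton (r : List (String × String)) : pvChoose [r] = r := by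
  simp [pvChoose, pvStepB_self]

lemma choose_append (es : List (List (String × String))) (h : es ≠ [])
    (r : List (String × String)) :
    pvChoose (es ++ [r]) = pvStepB (pvChoose es) r := by
  match es with
  | e :: t =>
    rw [List.cons_append, pvChoose_cons, pvChoose_cons, List.foldl_append]
    rfl

lemma pvFA_nodup (d : PySem.Dict String (List (List (String × String))))
    (r : List (String × String)) (hn : d.keys.Nodup) : (pvFA d r).keys.Nodup := by
  cases hc : d.contains (pvNorm (pvGetUrl r)) with
  | true =>
    rw [pvFA_contains d r hc]
    exact PySem.Dict.nodup_keys_insert _ _ _ hn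
  | false =>
    rw [pvFA_not_contains d r hc]
    exact PySem.Dict.nodup_keys_insert _ _ _ (PySem.Dict.nodup_keys_insert _ _ _ hn)

lemma pvFA_nonempty (d : PySem.Dict String (List (List (String × String))))
    (r : List (String × String)) (h : ∀ p ∈ d.items, p.2 ≠ []) :
    ∀ p ∈ (pvFA d r).items, p.2 ≠ [] := by
  cases hc : d.contains (pvNorm (pvGetUrl r)) with
  | true =>
    rw [pvFA_contains d r hc]
    intro p hp
    rcases (PySem.Dict.mem_items_insert _ _ _ _).1 hp with h1 | ⟨h2, _⟩
    · subst h1; simp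
    · exact h p h2
  | false =>
    rw [pvFA_insert_single d r hc]
    intro p hp
    rcases (PySem.Dict.mem_items_insert _ _ _ _).1 hp with h1 | ⟨h2, _⟩
    · subst h1; simp
    · exact h p h2

lemma step_eq (d : PySem.Dict String (List (List (String × String))))
    (r : List (String × String)) (hn : d.keys.Nodup) (hne : ∀ p ∈ d.items, p.2 ≠ []) :
    pvFB (pvMapChoose d) r = pvMapChoose (pvFA d r) := by
  cases hg : d.get? (pvNorm (pvGetUrl r)) with
  | none =>
    have hc : d.contains (pvNorm (pvGetUrl r)) = false := by
      rw [PySem.Dict.contains_eq_isSome_get?, hg]; rfl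
    have hgm : (pvMapChoose d).get? (pvNorm (pvGetUrl r)) = none := by
      rw [get?_mapChoose, hg]; rfl
    rw [pvFB_none _ _ hgm, pvFA_insert_single d r hc, mapChoose_insert, choose_singleton]
  | some es =>
    have hc : d.contains (pvNorm (pvGetUrl r)) = true := by
      rw [PySem.Dict.contains_eq_isSome_get?, hg]; rfl
    have hesne : es ≠ [] := hne _ (PySem.Dict.mem_items_of_get?_eq_some d hg)
    have hgm : (pvMapChoose d).get? (pvNorm (pvGetUrl r)) = some (pvChoose es) := by
      rw [get?_mapChoose, hg]; rfl
    rw [pvFB_some _ _ _ hgm, pvFA_contains d r hc,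
      PySem.Dict.getD_of_get?_eq_some d [] hg, mapChoose_insert, choose_append es hesne r]
    unfold pvStepB
    by_cases hb : pvRank (pvGetUrl (pvChoose es)) < pvRank (pvGetUrl r)
    · simp only [hb, if_true]
    · simp only [hb, if_false]
      exact (insert_get?_self (pvMapChoose d) _ (pvChoose es)
        (by rw [keys_mapChoose]; exact hn) hgm).symm

lemma fold_inv (rels : List (List (String × String))) :
    ∀ d : PySem.Dict String (List (List (String × String))), d.keys.Nodup →
      (∀ p ∈ d.items, p.2 ≠ []) →
      rels.foldl pvFB (pvMapChoose d) = pvMapChoose (rels.foldl pvFA d) := by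
  induction rels with
  | nil => intros; rfl
  | cons r rels ih =>
    intro d hn hne
    rw [List.foldl_cons, List.foldl_cons, step_eq d r hn hne,
      ih (pvFA d r) (pvFA_nodup d r hn) (pvFA_nonempty d r hne)]

lemma foldA_nonempty (rels : List (List (String × String))) :
    ∀ d : PySem.Dict String (List (List (String × String))),
      (∀ p ∈ d.items, p.2 ≠ []) → ∀ p ∈ (rels.foldl pvFA d).items, p.2 ≠ [] := by
  induction rels with
  | nil => intro d h; exact h
  | cons r rels ih =>
    intro d h
    rw [List.foldl_cons]
    exact ih (pvFA d r) (pvFA_nonempty d r h)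

-- each group of A's dict holds only relations with its normalized URL, pairwise tie-free
lemma foldA_groups (rels : List (List (String × String))) :
    ∀ d : PySem.Dict String (List (List (String × String))),
      (∀ p ∈ d.items, ∀ e ∈ p.2, pvNorm (pvGetUrl e) = p.1) →
      (∀ p ∈ d.items, p.2.Pairwise pvTieR) →
      (∀ p ∈ d.items, ∀ e ∈ p.2, ∀ r ∈ rels,
        pvNorm (pvGetUrl e) = pvNorm (pvGetUrl r) → pvTieR e r) →
      rels.Pairwise (fun x y => pvNorm (pvGetUrl x) = pvNorm (pvGetUrl y) → pvTieR x y) →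
      ∀ p ∈ (rels.foldl pvFA d).items,
        (∀ e ∈ p.2, pvNorm (pvGetUrl e) = p.1) ∧ p.2.Pairwise pvTieR := by
  induction rels with
  | nil => intro d h0 h3 _ _ p hp; exact ⟨h0 p hp, h3 p hp⟩
  | cons r rest ih =>
    intro d h0 h3 h4 hpair
    obtain ⟨hhead, hpair'⟩ := List.pairwise_cons.1 hpair
    rw [List.foldl_cons]
    have hmem : ∀ p ∈ (pvFA d r).items,
        (∃ es, d.get? (pvNorm (pvGetUrl r)) = some es ∧ p = (pvNorm (pvGetUrl r), es ++ [r]))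
        ∨ p = (pvNorm (pvGetUrl r), [r])
        ∨ (p ∈ d.items ∧ p.1 ≠ pvNorm (pvGetUrl r)) := by
      intro p hp
      by_cases hc : d.contains (pvNorm (pvGetUrl r)) = true
      · obtain ⟨es, hg⟩ : ∃ es, d.get? (pvNorm (pvGetUrl r)) = some es := by
          rw [PySem.Dict.contains_eq_isSome_get?] at hc
          exact Option.isSome_iff_exists.1 hc
        rw [pvFA_contains d r hc, PySem.Dict.getD_of_get?_eq_some d [] hg] at hp
        rcases (PySem.Dict.mem_items_insert _ _ _ _).1 hp with h1 | ⟨h2, h2'⟩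
        · exact Or.inl ⟨es, hg, h1⟩
        · exact Or.inr (Or.inr ⟨h2, h2'⟩)
      · rw [pvFA_insert_single d r (by simpa using hc)] at hp
        rcases (PySem.Dict.mem_items_insert _ _ _ _).1 hp with h1 | ⟨h2, h2'⟩
        · exact Or.inr (Or.inl h1)
        · exact Or.inr (Or.inr ⟨h2, h2'⟩)
    apply ih (pvFA d r)
    · -- group members carry the group's normalized URL
      intro p hp e he
      rcases hmem p hp with ⟨es, hg, h1⟩ | h1 | ⟨h2, _⟩
      · subst h1
        rcases List.mem_append.1 he with he' | he'
        · exact h0 _ (PySem.Dict.mem_items_of_get?_eq_some d hg) e he'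
        · rw [List.mem_singleton.1 he']
      · subst h1
        rw [List.mem_singleton.1 he]
      · exact h0 p h2 e he
    · -- groups stay pairwise tie-free
      intro p hp
      rcases hmem p hp with ⟨es, hg, h1⟩ | h1 | ⟨h2, _⟩
      · subst h1
        have hmemes := PySem.Dict.mem_items_of_get?_eq_some d hg
        refine List.pairwise_append.2 ⟨h3 _ hmemes, List.pairwise_singleton _ _, ?_⟩
        intro e he x hx
        rw [List.mem_singleton.1 hx]
        exact h4 _ hmemes e he r List.mem_cons_self (by rw [h0 _ hmemes e he])
      · subst h1; exact List.pairwise_singleton _ _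
      · exact h3 p h2
    · -- cross condition with the remaining relations
      intro p hp e he x hx
      rcases hmem p hp with ⟨es, hg, h1⟩ | h1 | ⟨h2, _⟩
      · subst h1
        rcases List.mem_append.1 he with he' | he'
        · exact h4 _ (PySem.Dict.mem_items_of_get?_eq_some d hg) e he' x
            (List.mem_cons_of_mem r hx)
        · rw [List.mem_singleton.1 he']
          exact hhead x hx
      · subst h1
        rw [List.mem_singleton.1 he]
        exact hhead x hx
      · exact h4 p h2 e he x (List.mem_cons_of_mem r hx)
    · exact hpair'

-- ===== VERDICT (by name: the statement is the Claim_ definition above) =====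
theorem deduplicate_by_url_spec : Claim_equal_deduplicate_by_url := by
  intro rels _ hpre
  unfold Spec_deduplicate_by_url
  have hA : deduplicate_by_url rels =
      (rels.foldl pvFA PySem.Dict.empty).items.foldl
        (fun deduplicated kv =>
          if kv.2.length == 1 then deduplicated ++ [PySem.List.pyGetD kv.2 0 []]
          else deduplicated ++ [dedupSelect (PySem.List.pyGetD kv.2 0 []) kv.2]) [] := rfl
  have hB : deduplicate_by_url_alt rels = (rels.foldl pvFB PySem.Dict.empty).values := rfl
  have hempty : ∀ p ∈ (PySem.Dict.empty :
      PySem.Dict String (List (List (String × String)))).items, p.2 ≠ [] := by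
    intro p hp
    simp [PySem.Dict.empty] at hp
  have hinv := fold_inv rels PySem.Dict.empty PySem.Dict.nodup_keys_empty hempty
  have hmapempty : pvMapChoose PySem.Dict.empty = PySem.Dict.empty := rfl
  rw [hmapempty] at hinv
  rw [hA, hB, hinv]
  have hne := foldA_nonempty rels PySem.Dict.empty hempty
  have hgroups := foldA_groups rels PySem.Dict.empty
    (by intro p hp; simp [PySem.Dict.empty] at hp)
    (by intro p hp; simp [PySem.Dict.empty] at hp)
    (by intro p hp; simp [PySem.Dict.empty] at hp)
    (hpre.imp (fun {x y} hxy hn ht h12 => hxy hn ht h12))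
  have hbody : ∀ (acc : List (List (String × String))) kv,
      kv ∈ (rels.foldl pvFA PySem.Dict.empty).items →
      (if kv.2.length == 1 then acc ++ [PySem.List.pyGetD kv.2 0 []]
       else acc ++ [dedupSelect (PySem.List.pyGetD kv.2 0 []) kv.2]) =
      acc ++ [pvChoose kv.2] := by
    intro acc kv hkv
    rw [← selectTop_eq_choose kv.2 (hne kv hkv) (hgroups kv hkv).2]
    unfold pvSelectTop
    by_cases hl : (kv.2.length == 1) = true
    · rw [if_pos hl, if_pos hl]
    · rw [if_neg hl, if_neg hl]
  rw [PySem.List.foldl_congr_mem _ _ (fun acc kv => acc ++ [pvChoose kv.2]) _ hbody]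
  simp only [PySem.List.foldl_append_singleton_eq_map]
  simp [pvMapChoose, PySem.Dict.values, List.map_map, Function.comp]
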